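-- pv_equiv track=rewrite | github.com/MehVahdJukaar/Supplementaries | add_conditions.py | reorder_top_level_keys
-- ===== SOURCE A (Python) =====
-- def reorder_top_level_keys(data):
--     """
--     Reorder top-level keys so that if present, "fabric:load_conditions" comes first,
--     then "neoforge:conditions", then all other keys.
--     """
--     new_data = {}
--     for key in ["fabric:load_conditions", "neoforge:conditions"]:
--         if key in data:
--             new_data[key] = data[key]
--     for key, value in data.items():
--         if key not in new_data:
--             new_data[key] = value
--     return new_data
-- ===== SOURCE B (Python) =====
-- def reorder_top_level_keys(data):
--     """
--     Reorder top-level keys so that if present, "fabric:load_conditions" comes first,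
--     then "neoforge:conditions", then all other keys.
--     """
--     rank = {"fabric:load_conditions": 0, "neoforge:conditions": 1}
--     return dict(sorted(data.items(), key=lambda kv: rank.get(kv[0], 2)))
-- ===== Notes on version B (the rewrite author's own statement) =====
-- stated objective: idiomatic
-- what changed: Replaces the two explicit partitioning passes building a dict incrementally with a single stable sort of data.items() under a priority map {'fabric:load_conditions':0,'neoforge:conditions':1, other:2}.
import Mathlib
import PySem

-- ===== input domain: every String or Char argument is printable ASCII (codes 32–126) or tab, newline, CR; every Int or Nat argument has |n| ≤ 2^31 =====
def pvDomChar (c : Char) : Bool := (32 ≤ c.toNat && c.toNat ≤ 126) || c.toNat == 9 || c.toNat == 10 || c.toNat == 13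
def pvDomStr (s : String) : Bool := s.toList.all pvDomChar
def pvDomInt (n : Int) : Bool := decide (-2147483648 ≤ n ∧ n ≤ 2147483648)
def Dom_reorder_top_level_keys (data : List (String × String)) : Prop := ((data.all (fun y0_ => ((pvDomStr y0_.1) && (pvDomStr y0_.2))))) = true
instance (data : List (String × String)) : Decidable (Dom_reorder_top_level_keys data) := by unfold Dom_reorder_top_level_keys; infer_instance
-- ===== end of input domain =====

-- B replaces A's two explicit partitioning passes over the dict with one stable sort
-- of data.items() under a priority map (fabric → 0, neoforge → 1, other keys → 2);
-- same result, stated for association lists with distinct keys (a Python dict's items).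

-- ===== PORT A =====
def pvKeyF : String := "fabric:load_conditions"
def pvKeyN : String := "neoforge:conditions"

def reorder_top_level_keys (data : List (String × String)) : List (String × String) :=
  let d : PySem.Dict String String := PySem.Dict.mk data
  -- for key in [...]: if key in data: new_data[key] = data[key]
  let new1 : PySem.Dict String String :=
    [pvKeyF, pvKeyN].foldl
      (fun nd key =>
        match d.get? key with
        | some v => nd.insert key v
        | none => nd)
      PySem.Dict.empty
  -- for key, value in data.items(): if key not in new_data: new_data[key] = value
  let new2 : PySem.Dict String String :=
    data.foldl (fun nd kv => if nd.contains kv.1 then nd else nd.insert kv.1 kv.2) new1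
  new2.items

-- ===== PORT B =====
def pvRank : PySem.Dict String Int :=
  PySem.Dict.ofList [(pvKeyF, 0), (pvKeyN, 1)]

def reorder_top_level_keys_alt (data : List (String × String)) : List (String × String) :=
  (PySem.Dict.ofList
    (PySem.List.sorted data (fun kv => pvRank.getD kv.1 2) false)).items

-- ===== PRECONDITION & SPEC =====
-- Pre_ excludes association lists with duplicate keys: they cannot arise from the
-- Python argument (a dict), so neither program's value there reflects any Python run.
def Pre_reorder_top_level_keys (data : List (String × String)) : Prop :=
  (data.map Prod.fst).Nodup
instance (data : List (String × String)) : Decidable (Pre_reorder_top_level_keys data) := by unfold Pre_reorder_top_level_keys; infer_instance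

def pvWitness_reorder_top_level_keys : (List (String × String)) :=
  [("minecraft:recipe", "x"), ("neoforge:conditions", "[]"), ("fabric:load_conditions", "[]"), ("result", "y")]

def Spec_reorder_top_level_keys (data : List (String × String)) (out : List (String × String)) : Prop := out = reorder_top_level_keys_alt data
instance (data : List (String × String)) (out : List (String × String)) : Decidable (Spec_reorder_top_level_keys data out) := by unfold Spec_reorder_top_level_keys; infer_instance

-- ===== CLAIM (what is proved, stated in full; the proofs are below) =====
def Claim_equal_reorder_top_level_keys : Prop := ∀ (data : List (String × String)), Dom_reorder_top_level_keys data → Pre_reorder_top_level_keys data → Spec_reorder_top_level_keys data (reorder_top_level_keys data)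

-- ===== LEMMAS AND PROOFS =====

-- the rank function B's priority map computes
def pvR (k : String) : Int := if k = pvKeyF then 0 else if k = pvKeyN then 1 else 2

theorem pvRank_getD (k : String) : pvRank.getD k 2 = pvR k := by
  simp only [pvRank, pvR, PySem.Dict.ofList, PySem.Dict.update, List.foldl_cons,
    List.foldl_nil, PySem.Dict.getD_insert, PySem.Dict.getD_empty]
  split_ifs with h1 h2 <;> simp_all [pvKeyF, pvKeyN]

-- insert before a block whose every element compares ≥ the new one
theorem pv_insertBy_cons {α : Type} (b : α → α → Bool) (x a : α) (t : List α) :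
    PySem.List.insertBy b x (a :: t)
      = if b x a then x :: a :: t else a :: PySem.List.insertBy b x t := rfl

theorem pv_insertBy_append {α : Type} (b : α → α → Bool) (x : α) (A B : List α)
    (h : ∀ a ∈ A, b x a = false) :
    PySem.List.insertBy b x (A ++ B) = A ++ PySem.List.insertBy b x B := by
  induction A with
  | nil => simp
  | cons a A ih =>
      have ha : b x a = false := h a (by simp)
      rw [List.cons_append, pv_insertBy_cons, ha, if_neg (by simp),
        ih (fun y hy => h y (by simp [hy])), List.cons_append]

theorem pv_insertBy_front {α : Type} (b : α → α → Bool) (x : α) (C : List α)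
    (h : ∀ c ∈ C, b x c = true) :
    PySem.List.insertBy b x C = x :: C := by
  cases C with
  | nil => rfl
  | cons c C => rw [pv_insertBy_cons, h c (by simp), if_pos rfl]

-- B's stable sort is exactly the three rank blocks in input order
def pvBlocks (data : List (String × String)) : List (String × String) :=
  data.filter (fun p => pvR p.1 == 0) ++ data.filter (fun p => pvR p.1 == 1)
    ++ data.filter (fun p => pvR p.1 == 2)

theorem pvR_cases (k : String) : pvR k = 0 ∨ pvR k = 1 ∨ pvR k = 2 := by
  unfold pvR; split_ifs <;> simp

theorem pv_insert_blocks (l : List (String × String)) (x : String × String) :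
    PySem.List.insertBy (fun a b => decide (pvR a.1 < pvR b.1)) x (pvBlocks l)
      = pvBlocks (l ++ [x]) := by
  have m0 : ∀ c ∈ l.filter (fun p => pvR p.1 == 0), pvR c.1 = 0 := by
    intro c hc; simpa using (List.mem_filter.mp hc).2
  have m1 : ∀ c ∈ l.filter (fun p => pvR p.1 == 1), pvR c.1 = 1 := by
    intro c hc; simpa using (List.mem_filter.mp hc).2
  have m2 : ∀ c ∈ l.filter (fun p => pvR p.1 == 2), pvR c.1 = 2 := by
    intro c hc; simpa using (List.mem_filter.mp hc).2
  unfold pvBlocks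
  simp only [List.filter_append, List.filter_cons, List.filter_nil]
  rcases pvR_cases x.1 with h | h | h
  · -- rank 0: end of the first block
    rw [List.append_assoc,
      pv_insertBy_append _ _ _ _ (fun a ha => by simp [h, m0 a ha]),
      pv_insertBy_front _ _ _ (fun c hc => by
        rcases List.mem_append.mp hc with hc | hc
        · simp [h, m1 c hc]
        · simp [h, m2 c hc])]
    simp [h]
  · -- rank 1: end of the second block
    rw [pv_insertBy_append _ _ _ _ (fun a ha => by
        rcases List.mem_append.mp ha with ha | ha
        · simp [h, m0 a ha]
        · simp [h, m1 a ha]),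
      pv_insertBy_front _ _ _ (fun c hc => by simp [h, m2 c hc])]
    simp [h]
  · -- rank 2: end of everything
    rw [PySem.List.insertBy_of_forall_not_before _ _ _ (fun a ha => by
        rcases List.mem_append.mp ha with ha | ha
        · rcases List.mem_append.mp ha with ha | ha
          · simp [h, m0 a ha]
          · simp [h, m1 a ha]
        · simp [h, m2 a ha])]
    simp [h]

theorem pv_sorted_eq_blocks (data : List (String × String)) :
    PySem.List.sorted data (fun kv => pvRank.getD kv.1 2) false = pvBlocks data := by
  have hk : (fun kv : String × String => pvRank.getD kv.1 2) = (fun kv => pvR kv.1) :=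
    funext fun kv => pvRank_getD kv.1
  rw [hk]
  induction data using List.reverseRecOn with
  | nil => simp [PySem.List.sorted, pvBlocks]
  | append_singleton l x ih =>
      rw [PySem.List.sorted_eq_foldl_insertBy, List.foldl_append, List.foldl_cons,
        List.foldl_nil, ← PySem.List.sorted_eq_foldl_insertBy, ih]
      exact pv_insert_blocks l x

-- ordered-dict-building second loop of A: with distinct keys it appends the unseen pairs
theorem pv_foldl_skip (l : List (String × String)) (d : PySem.Dict String String)
    (hd : d.keys.Nodup) (hl : (l.map Prod.fst).Nodup) :
    (l.foldl (fun nd kv => if nd.contains kv.1 then nd else nd.insert kv.1 kv.2) d).items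
      = d.items ++ l.filter (fun kv => !(d.contains kv.1)) := by
  induction l generalizing d with
  | nil => simp
  | cons p l ih =>
      simp only [List.map_cons, List.nodup_cons] at hl
      by_cases hc : d.contains p.1 = true
      · rw [List.foldl_cons, if_pos hc, ih d hd hl.2, List.filter_cons]
        have hb : (!d.contains p.1) = false := by simp [hc]
        rw [hb]
        simp
      · rw [List.foldl_cons, if_neg hc,
          ih (d.insert p.1 p.2)
            (by simpa using PySem.Dict.nodup_keys_insert (d := d) (k := p.1) (v := p.2) hd)
            hl.2,
          PySem.Dict.items_insert_of_not_contains _ _ (by simpa using hc),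
          List.filter_cons]
        have hb : (!d.contains p.1) = true := by simp [hc]
        rw [hb]
        have hcg : l.filter (fun kv => !((d.insert p.1 p.2).contains kv.1))
            = l.filter (fun kv => !(d.contains kv.1)) := by
          apply List.filter_congr
          intro q hq
          have hne : q.1 ≠ p.1 := by
            intro he; exact hl.1 (he ▸ List.mem_map_of_mem hq)
          simp [PySem.Dict.contains_insert, hne]
        rw [hcg]
        simp

-- with distinct keys, a successful first-match lookup IS the singleton filter
theorem pv_filter_of_find_some (l : List (String × String)) (k : String)
    (hl : (l.map Prod.fst).Nodup) (q : String × String)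
    (hf : l.find? (fun p => p.1 == k) = some q) :
    l.filter (fun p => p.1 == k) = [q] ∧ q.1 = k := by
  induction l with
  | nil => simp at hf
  | cons r l ih =>
      simp only [List.map_cons, List.nodup_cons] at hl
      by_cases hp : r.1 == k
      · simp only [List.find?_cons, hp] at hf
        have hq : q = r := (Option.some.inj hf).symm
        subst hq
        have hrest : l.filter (fun p => p.1 == k) = [] := by
          rw [List.filter_eq_nil_iff]
          intro a ha hak
          exact hl.1 (by
            have he : (a.1 : String) = q.1 := by
              have h1 : a.1 = k := by simpa using hak
              have h2 : q.1 = k := by simpa using hp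
              rw [h1, h2]
            exact he ▸ List.mem_map_of_mem ha)
        refine ⟨?_, by simpa using hp⟩
        simp [hp, hrest]
      · simp only [List.find?_cons, hp] at hf
        have hres := ih hl.2 hf
        simp [hp, hres.1, hres.2]

theorem pv_filter_of_find_none (l : List (String × String)) (k : String)
    (hf : l.find? (fun p => p.1 == k) = none) :
    l.filter (fun p => p.1 == k) = [] := by
  rw [List.filter_eq_nil_iff]; exact List.find?_eq_none.mp hf

-- dict(pairs) with distinct keys keeps exactly those pairs
theorem pv_ofList_items (l : List (String × String)) (hl : (l.map Prod.fst).Nodup) :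
    (PySem.Dict.ofList l).items = l := by
  have := PySem.Dict.items_foldl_insert_fresh (l := l) (k := Prod.fst) (v := Prod.snd)
    (d := (PySem.Dict.empty : PySem.Dict String String))
    (by intro a _; simp [PySem.Dict.contains_empty]) hl
  simpa [PySem.Dict.ofList, PySem.Dict.update] using this

-- pointwise reformulations of the three rank tests
theorem pvR_eq0 (k : String) : ((pvR k == 0) : Bool) = (k == pvKeyF) := by
  unfold pvR; split_ifs with h1 h2 <;> simp_all [pvKeyF, pvKeyN]
theorem pvR_eq1 (k : String) : ((pvR k == 1) : Bool) = (k == pvKeyN) := by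
  unfold pvR; split_ifs with h1 h2 <;> simp_all [pvKeyF, pvKeyN]
theorem pvR_eq2 (k : String) : ((pvR k == 2) : Bool) = (!(k == pvKeyF) && !(k == pvKeyN)) := by
  unfold pvR; split_ifs with h1 h2 <;> simp_all [pvKeyF, pvKeyN]

theorem pv_get?_mk (data : List (String × String)) (k : String) :
    (PySem.Dict.mk data).get? k = (data.find? (fun p => p.1 == k)).map (·.2) := rfl

-- the heart of the file: A's two dict-building passes produce exactly B's three blocks
theorem pv_a_eq_blocks (data : List (String × String))
    (hpre : (data.map Prod.fst).Nodup) :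
    reorder_top_level_keys data = pvBlocks data := by
  unfold reorder_top_level_keys pvBlocks
  simp only [List.foldl_cons, List.foldl_nil]
  rw [show data.filter (fun p => pvR p.1 == 0) = data.filter (fun p => p.1 == pvKeyF) from
      List.filter_congr (fun x _ => pvR_eq0 x.1),
    show data.filter (fun p => pvR p.1 == 1) = data.filter (fun p => p.1 == pvKeyN) from
      List.filter_congr (fun x _ => pvR_eq1 x.1)]
  rcases hof : (PySem.Dict.mk data).get? pvKeyF with _ | vf <;>
    rcases hon : (PySem.Dict.mk data).get? pvKeyN with _ | vn
  · -- neither key present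
    rw [pv_get?_mk, Option.map_eq_none_iff] at hof hon
    rw [pv_filter_of_find_none _ _ hof, pv_filter_of_find_none _ _ hon]
    rw [pv_foldl_skip data PySem.Dict.empty (by simp) hpre]
    simp only [List.nil_append]
    have : (PySem.Dict.empty : PySem.Dict String String).items = [] := rfl
    rw [this, List.nil_append]
    apply List.filter_congr
    intro x hx
    have hxF : ¬(x.1 == pvKeyF) = true := List.find?_eq_none.mp hof x hx
    have hxN : ¬(x.1 == pvKeyN) = true := List.find?_eq_none.mp hon x hx
    simp [PySem.Dict.contains_empty, pvR_eq2, hxF, hxN]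
  · -- only neoforge present
    rw [pv_get?_mk, Option.map_eq_none_iff] at hof
    rw [pv_get?_mk] at hon
    obtain ⟨qn, hfindn, hqn2⟩ := Option.map_eq_some_iff.mp hon
    obtain ⟨hfiltn, hqn1⟩ := pv_filter_of_find_some data pvKeyN hpre qn hfindn
    rw [pv_filter_of_find_none _ _ hof, hfiltn]
    have hcE : (PySem.Dict.empty : PySem.Dict String String).contains pvKeyN = false :=
      PySem.Dict.contains_empty _
    rw [pv_foldl_skip data (PySem.Dict.empty.insert pvKeyN vn)
      (by simpa using PySem.Dict.nodup_keys_insert _ _ _ PySem.Dict.nodup_keys_empty) hpre,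
      PySem.Dict.items_insert_of_not_contains _ _ hcE]
    have hq : qn = (pvKeyN, vn) := by
      cases qn; simp_all
    rw [hq]
    have : (PySem.Dict.empty : PySem.Dict String String).items = [] := rfl
    rw [this, List.nil_append]
    congr 1
    apply List.filter_congr
    intro x hx
    have hxF : ¬(x.1 == pvKeyF) = true := List.find?_eq_none.mp hof x hx
    simp [PySem.Dict.contains_insert, PySem.Dict.contains_empty, pvR_eq2, hxF]
  · -- only fabric present
    rw [pv_get?_mk, Option.map_eq_none_iff] at hon
    rw [pv_get?_mk] at hof
    obtain ⟨qf, hfindf, hqf2⟩ := Option.map_eq_some_iff.mp hof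
    obtain ⟨hfiltf, hqf1⟩ := pv_filter_of_find_some data pvKeyF hpre qf hfindf
    rw [pv_filter_of_find_none _ _ hon, hfiltf]
    have hcE : (PySem.Dict.empty : PySem.Dict String String).contains pvKeyF = false :=
      PySem.Dict.contains_empty _
    rw [pv_foldl_skip data (PySem.Dict.empty.insert pvKeyF vf)
      (by simpa using PySem.Dict.nodup_keys_insert _ _ _ PySem.Dict.nodup_keys_empty) hpre,
      PySem.Dict.items_insert_of_not_contains _ _ hcE]
    have hq : qf = (pvKeyF, vf) := by
      cases qf; simp_all
    rw [hq]
    have : (PySem.Dict.empty : PySem.Dict String String).items = [] := rfl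
    rw [this, List.nil_append]
    congr 1
    apply List.filter_congr
    intro x hx
    have hxN : ¬(x.1 == pvKeyN) = true := List.find?_eq_none.mp hon x hx
    simp [PySem.Dict.contains_insert, PySem.Dict.contains_empty, pvR_eq2, hxN]
  · -- both keys present
    rw [pv_get?_mk] at hof hon
    obtain ⟨qf, hfindf, hqf2⟩ := Option.map_eq_some_iff.mp hof
    obtain ⟨qn, hfindn, hqn2⟩ := Option.map_eq_some_iff.mp hon
    obtain ⟨hfiltf, hqf1⟩ := pv_filter_of_find_some data pvKeyF hpre qf hfindf
    obtain ⟨hfiltn, hqn1⟩ := pv_filter_of_find_some data pvKeyN hpre qn hfindn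
    rw [hfiltf, hfiltn]
    have hcE : (PySem.Dict.empty : PySem.Dict String String).contains pvKeyF = false :=
      PySem.Dict.contains_empty _
    have hc1 : (PySem.Dict.empty.insert pvKeyF vf : PySem.Dict String String).contains pvKeyN
        = false := by
      rw [PySem.Dict.contains_insert]
      simp [PySem.Dict.contains_empty, pvKeyF, pvKeyN]
    have hnd : ((PySem.Dict.empty.insert pvKeyF vf).insert pvKeyN vn
        : PySem.Dict String String).keys.Nodup := by
      simpa using PySem.Dict.nodup_keys_insert _ _ _
        (PySem.Dict.nodup_keys_insert _ _ _ PySem.Dict.nodup_keys_empty)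
    rw [pv_foldl_skip data ((PySem.Dict.empty.insert pvKeyF vf).insert pvKeyN vn) hnd hpre,
      PySem.Dict.items_insert_of_not_contains _ _ hc1,
      PySem.Dict.items_insert_of_not_contains _ _ hcE]
    have hq : qf = (pvKeyF, vf) := by cases qf; simp_all
    have hq' : qn = (pvKeyN, vn) := by cases qn; simp_all
    rw [hq, hq']
    have : (PySem.Dict.empty : PySem.Dict String String).items = [] := rfl
    rw [this, List.nil_append]
    simp only [List.cons_append, List.nil_append]
    congr 2
    apply List.filter_congr
    intro x hx
    simp only [PySem.Dict.contains_insert, PySem.Dict.contains_empty, pvR_eq2,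
      Bool.or_false]
    rw [Bool.not_or, Bool.and_comm]

-- ===== VERDICT (by name: the statement is the Claim_ definition above) =====
theorem reorder_top_level_keys_spec : Claim_equal_reorder_top_level_keys := by
  intro data _ hpre
  unfold Spec_reorder_top_level_keys reorder_top_level_keys_alt
  rw [pv_sorted_eq_blocks,
    pv_ofList_items _ (by
      have hperm : (pvBlocks data).Perm data := by
        rw [← pv_sorted_eq_blocks]; exact PySem.List.sorted_perm _ _ _
      exact ((hperm.map Prod.fst).nodup_iff).mpr hpre)]
  exact pv_a_eq_blocks data hpre
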